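-- pv_equiv track=rewrite | github.com/AdityaRon/InterviewQuery | python/bigrams.py | find_bigrams
-- ===== SOURCE A (Python) =====
-- def find_bigrams(sentence):
--     senetence_list = sentence.lower().strip().split(" ")
--     result = []
--     temp = senetence_list[0]
--     for word in senetence_list[1:]:
--         if word != '':
--             result.append(tuple([temp, word]))
--             temp = word
--     return result
-- ===== SOURCE B (Python) =====
-- def find_bigrams(sentence):
--     words = [w for w in sentence.lower().strip().split(" ") if w != '']
--     return list(zip(words, words[1:]))
-- ===== Notes on version B (the rewrite author's own statement) =====
-- stated objective: simpler
-- what changed: Replaces the single loop that interleaves filtering with a mutable previous-word accumulator by two separate passes: first build the filtered word list, then pair consecutive words with zip(words, words[1:]).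
import Mathlib
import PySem

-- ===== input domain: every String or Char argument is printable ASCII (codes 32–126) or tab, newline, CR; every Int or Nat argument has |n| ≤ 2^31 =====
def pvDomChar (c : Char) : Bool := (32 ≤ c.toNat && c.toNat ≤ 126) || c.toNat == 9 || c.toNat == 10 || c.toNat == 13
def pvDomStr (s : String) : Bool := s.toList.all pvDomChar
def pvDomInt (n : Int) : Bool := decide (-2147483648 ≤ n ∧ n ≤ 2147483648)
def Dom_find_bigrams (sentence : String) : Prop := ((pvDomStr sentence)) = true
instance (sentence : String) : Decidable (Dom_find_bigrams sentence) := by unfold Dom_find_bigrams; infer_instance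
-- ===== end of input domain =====

-- B replaces A's single loop carrying a mutable previous-word accumulator by two separate passes
-- (filter the split words, then zip consecutive pairs); objective: simpler, same cost.

-- ===== PORT A =====
-- sentence.lower().strip().split(" "); temp = list[0]; loop over list[1:] appending (temp, word), updating temp.
def find_bigrams (sentence : String) : List (String × String) :=
  let senetence_list : List String :=
    (PySem.Chars.splitOn (PySem.Chars.strip (PySem.Chars.lower sentence.toList)) [' ']).map String.ofList
  match PySem.List.pyGet? senetence_list 0 with
  | none => []  -- unreachable: split(" ") never returns an empty list (Python would raise IndexError)
  | some temp0 =>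
    ((PySem.List.slice senetence_list (some 1) none).foldl
      (fun (st : List (String × String) × String) word =>
        if word ≠ "" then (st.1 ++ [(st.2, word)], word) else st)
      ([], temp0)).1

-- ===== PORT B =====
-- words = [w for w in sentence.lower().strip().split(" ") if w != '']; return list(zip(words, words[1:]))
def find_bigrams_alt (sentence : String) : List (String × String) :=
  let words : List String :=
    ((PySem.Chars.splitOn (PySem.Chars.strip (PySem.Chars.lower sentence.toList)) [' ']).map String.ofList).filter
      (fun w => w ≠ "")
  words.zip (PySem.List.slice words (some 1) none)

-- ===== PRECONDITION & SPEC =====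
def Spec_find_bigrams (sentence : String) (out : List (String × String)) : Prop := out = find_bigrams_alt sentence
instance (sentence : String) (out : List (String × String)) : Decidable (Spec_find_bigrams sentence out) := by unfold Spec_find_bigrams; infer_instance

-- ===== CLAIM (what is proved, stated in full; the proofs are below) =====
def Claim_equal_find_bigrams : Prop := ∀ (sentence : String), Dom_find_bigrams sentence → Spec_find_bigrams sentence (find_bigrams sentence)

-- ===== LEMMAS AND PROOFS =====

-- A's loop with initial temp h over t builds exactly the consecutive pairs of h :: (t filtered).
theorem pv_loopA_eq (t : List String) (h : String) (acc : List (String × String)) :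
    (t.foldl (fun (st : List (String × String) × String) word =>
        if word ≠ "" then (st.1 ++ [(st.2, word)], word) else st) (acc, h)).1
      = acc ++ (h :: t.filter (fun w => w ≠ "")).zip (t.filter (fun w => w ≠ "")) := by
  induction t generalizing h acc with
  | nil => simp
  | cons w t ih =>
    by_cases hw : w = ""
    · subst hw; simpa using ih h acc
    · simp only [List.foldl_cons, if_pos hw]
      rw [ih w (acc ++ [(h, w)])]
      simp [hw, List.zip]

-- splitOn.go always produces acc.reverse followed by a first piece extending cur.reverse.
theorem pv_go_shape (fuel : Nat) (l cur : List Char) (acc : List (List Char)) :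
    ∃ pre res, PySem.Chars.splitOn.go [' '] fuel l cur acc
      = acc.reverse ++ (cur.reverse ++ pre) :: res := by
  induction fuel generalizing l cur acc with
  | zero => exact ⟨l, [], by simp [PySem.Chars.splitOn.go]⟩
  | succ fuel ih =>
    cases l with
    | nil => exact ⟨[], [], by simp [PySem.Chars.splitOn.go]⟩
    | cons c rest =>
      by_cases hp : [' '].isPrefixOf (c :: rest) = true
      · obtain ⟨pre, res, hh⟩ := ih (List.drop 1 (c :: rest)) [] (cur.reverse :: acc)
        refine ⟨[], pre :: res, ?_⟩
        simp only [PySem.Chars.splitOn.go, hp, if_true]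
        simpa using hh
      · obtain ⟨pre, res, hh⟩ := ih rest (c :: cur) acc
        refine ⟨c :: pre, res, ?_⟩
        simp only [PySem.Chars.splitOn.go, hp]
        simpa using hh

-- If the input starts with a non-space character, the first piece of split(" ") starts with it.
theorem pv_splitOn_head (c : Char) (cs : List Char) (hc : c ≠ ' ') :
    ∃ pre res, PySem.Chars.splitOn (c :: cs) [' '] = (c :: pre) :: res := by
  obtain ⟨pre, res, hh⟩ := pv_go_shape (cs.length + 1) cs [c] []
  refine ⟨pre, res, ?_⟩
  have hp : [' '].isPrefixOf (c :: cs) = false := by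
    simp [List.isPrefixOf]
    exact Ne.symm hc
  simp only [PySem.Chars.splitOn, List.length_cons]
  rw [show cs.length + 1 + 1 = (cs.length + 1) + 1 from rfl]
  simp only [PySem.Chars.splitOn.go, hp]
  simpa using hh

-- strip yields [] or a string whose first character is not whitespace (so not ' ').
theorem pv_strip_head (x : List Char) :
    PySem.Chars.strip x = [] ∨
      ∃ c cs, PySem.Chars.strip x = c :: cs ∧ PySem.Chars.isspace c = false := by
  unfold PySem.Chars.strip
  cases hy : PySem.Chars.lstrip x with
  | nil => left; simp [PySem.Chars.rstrip]
  | cons c y' =>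
    have hc : PySem.Chars.isspace c = false := by
      have hhead : (PySem.Chars.lstrip x).head? = some c := by rw [hy]; rfl
      have hnot := List.head?_dropWhile_not (p := PySem.Chars.isspace) (l := x)
      unfold PySem.Chars.lstrip at hhead
      rw [hhead] at hnot
      simpa using hnot
    cases hr : PySem.Chars.rstrip (c :: y') with
    | nil => left; rfl
    | cons d r' =>
      have hpref : PySem.Chars.rstrip (c :: y') <+: c :: y' := by
        unfold PySem.Chars.rstrip
        simpa using (List.dropWhile_suffix (p := PySem.Chars.isspace)
          (l := (c :: y').reverse)).reverse
      rw [hr] at hpref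
      rcases hpref with ⟨tl, htl⟩
      rw [List.cons_append] at htl
      injection htl with hd _
      right; exact ⟨d, r', rfl, hd ▸ hc⟩

-- helper: a nonempty character list does not embed to the empty string
theorem pv_ofList_cons_ne_empty (c : Char) (l : List Char) : String.ofList (c :: l) ≠ "" := by
  intro h
  have := congrArg String.toList h
  simp at this

-- ===== VERDICT (by name: the statement is the Claim_ definition above) =====
theorem find_bigrams_spec : Claim_equal_find_bigrams := by
  intro sentence _
  unfold Spec_find_bigrams find_bigrams find_bigrams_alt
  rcases pv_strip_head (PySem.Chars.lower sentence.toList) with hs | ⟨c, cs, hs, hc⟩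
  · rw [hs]; decide
  · have hc' : c ≠ ' ' := by
      intro h; subst h; simp [PySem.Chars.isspace] at hc
    obtain ⟨pre, res, hsp⟩ := pv_splitOn_head c cs hc'
    rw [hs, hsp]
    have hslice : ∀ (xs : List String), PySem.List.slice xs (some 1) none = xs.drop 1 :=
      fun xs => by simp [pysem]
    simp only [List.map_cons, hslice, List.drop_one, List.tail_cons]
    rw [show PySem.List.pyGet? (String.ofList (c :: pre) :: List.map String.ofList res) 0
        = some (String.ofList (c :: pre)) from by simp [PySem.List.pyGet?, PySem.List.pyIdx?]]
    have hne := pv_ofList_cons_ne_empty c pre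
    have hred := pv_loopA_eq (List.map String.ofList res) (String.ofList (c :: pre)) []
    simp only [List.nil_append] at hred
    rw [show (List.filter (fun w => decide (w ≠ "")) (String.ofList (c :: pre) :: List.map String.ofList res))
        = String.ofList (c :: pre) :: List.filter (fun w => decide (w ≠ "")) (List.map String.ofList res)
        from List.filter_cons_of_pos (by simp [hne]), List.tail_cons]
    exact hred
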